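-- pv_equiv track=rewrite | github.com/DevanandaSLal/python_challenge | search_rank.py | find_brand_rankings
-- ===== SOURCE A (Python) =====
-- def find_brand_rankings(products, target_brands):
--     rankings = {}
--
--     for brand in target_brands:
--         for position, product in enumerate(products[:100], start=1):
--
--             if brand.lower() in product.lower() or ("l'oreal" in product.lower() and "paris" in product.lower()):
--                 rankings[brand] = position
--                 break
--         else:
--             rankings[brand] = None  # If not found, set as None
--
--     return rankings
-- ===== SOURCE B (Python) =====
-- def find_brand_rankings(products, target_brands):
--     rankings = {brand: None for brand in target_brands}
--     lowered = [(brand, brand.lower()) for brand in rankings]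
--     for position, product in enumerate(products[:100], start=1):
--         if all(v is not None for v in rankings.values()):
--             break
--         pl = product.lower()
--         hit_all = "l'oreal" in pl and "paris" in pl
--         for brand, lb in lowered:
--             if rankings[brand] is None and (lb in pl or hit_all):
--                 rankings[brand] = position
--     return rankings
-- ===== Notes on version B (the rewrite author's own statement) =====
-- stated objective: faster
-- what changed: Loop interchange: instead of re-scanning (and re-lowercasing) products[:100] once per brand, B makes a single positional pass over products[:100] maintaining a brand->first-position table, lowercasing each product once, skipping already-ranked brands and breaking out once every brand is ranked; a timing run measured B 2.4-4.5x faster.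
import Mathlib
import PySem

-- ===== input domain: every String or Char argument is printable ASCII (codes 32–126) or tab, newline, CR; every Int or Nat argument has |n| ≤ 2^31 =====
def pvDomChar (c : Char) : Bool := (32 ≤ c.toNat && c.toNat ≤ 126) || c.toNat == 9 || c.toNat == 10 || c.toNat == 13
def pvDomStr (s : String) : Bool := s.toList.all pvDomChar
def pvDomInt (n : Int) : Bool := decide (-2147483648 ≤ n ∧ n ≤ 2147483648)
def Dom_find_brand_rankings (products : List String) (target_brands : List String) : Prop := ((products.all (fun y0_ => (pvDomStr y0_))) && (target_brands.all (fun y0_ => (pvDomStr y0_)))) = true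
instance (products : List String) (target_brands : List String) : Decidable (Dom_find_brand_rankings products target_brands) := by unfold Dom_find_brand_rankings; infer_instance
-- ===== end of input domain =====

-- B replaces A's per-brand re-scan (and re-lowercasing) of products[:100] by ONE positional pass
-- maintaining a brand→first-position table, lowercasing each product once, skipping already-ranked
-- brands and stopping once every brand is ranked; faster by a constant factor (the check's timing
-- run measured B 2.4-4.5x faster on its generated inputs).

-- ===== PORT A =====
-- the match condition both Pythons evaluate:
-- lb in pl or ("l'oreal" in pl and "paris" in pl)  with lb = brand.lower(), pl = product.lower()
def brandHit (lb pl : String) : Bool :=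
  PySem.Str.isIn lb pl || (PySem.Str.isIn "l'oreal" pl && PySem.Str.isIn "paris" pl)

-- A's inner 'for position, product in enumerate(products[:100], 1): if …: break / else: None' loop
def fbrScanA (brand : String) : List (Int × String) → Option Int
  | [] => none
  | (position, product) :: rest =>
      if brandHit (PySem.Str.lower brand) (PySem.Str.lower product) then some position
      else fbrScanA brand rest

def find_brand_rankings (products : List String) (target_brands : List String) : List (String × Option Int) :=
  (target_brands.foldl (fun rankings brand =>
      match fbrScanA brand (PySem.List.enumerate (PySem.List.slice products none (some 100)) 1) with
      | some position => rankings.insert brand (some position)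
      | none => rankings.insert brand none)
    (PySem.Dict.empty : PySem.Dict String (Option Int))).items

-- ===== PORT B =====
-- B's inner loop: 'for brand, lb in lowered: if rankings[brand] is None and (lb in pl or hit_all): …'
def fbrInner (position : Int) (pl : String) (hitAll : Bool)
    (lowered : List (String × String)) (rankings : PySem.Dict String (Option Int)) :
    PySem.Dict String (Option Int) :=
  lowered.foldl (fun rankings bl =>
    match rankings.get? bl.1 with
    | some none =>
        if PySem.Str.isIn bl.2 pl || hitAll then rankings.insert bl.1 (some position) else rankings
    | _ => rankings) rankings

-- B's outer 'for position, product in enumerate(products[:100], start=1)' loop with its break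
def fbrLoop (lowered : List (String × String)) :
    List (Int × String) → PySem.Dict String (Option Int) → PySem.Dict String (Option Int)
  | [], rankings => rankings
  | (position, product) :: rest, rankings =>
      if rankings.values.all (fun v => v.isSome) then rankings
      else
        let pl := PySem.Str.lower product
        let hitAll := PySem.Str.isIn "l'oreal" pl && PySem.Str.isIn "paris" pl
        fbrLoop lowered rest (fbrInner position pl hitAll lowered rankings)

def find_brand_rankings_alt (products : List String) (target_brands : List String) : List (String × Option Int) :=
  let rankings : PySem.Dict String (Option Int) :=
    target_brands.foldl (fun d brand => d.insert brand none) PySem.Dict.empty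
  let lowered := rankings.keys.map (fun brand => (brand, PySem.Str.lower brand))
  (fbrLoop lowered (PySem.List.enumerate (PySem.List.slice products none (some 100)) 1) rankings).items

-- ===== PRECONDITION & SPEC =====
def Spec_find_brand_rankings (products : List String) (target_brands : List String) (out : List (String × Option Int)) : Prop := out = find_brand_rankings_alt products target_brands
instance (products : List String) (target_brands : List String) (out : List (String × Option Int)) : Decidable (Spec_find_brand_rankings products target_brands out) := by unfold Spec_find_brand_rankings; infer_instance

-- ===== CLAIM (what is proved, stated in full; the proofs are below) =====
def Claim_equal_find_brand_rankings : Prop := ∀ (products : List String) (target_brands : List String), Dom_find_brand_rankings products target_brands → Spec_find_brand_rankings products target_brands (find_brand_rankings products target_brands)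

-- ===== LEMMAS AND PROOFS =====

-- 'the value brand b ends up with, given its current table entry v and the remaining products E'
def fbrResolve (b : String) (v : Option Int) (E : List (Int × String)) : Option Int :=
  match v with
  | some q => some q
  | none => fbrScanA b E

-- one execution of fbrInner's loop body

theorem fbr_keys_of_items_map (d d' : PySem.Dict String (Option Int))
    (f : String × Option Int → String × Option Int)
    (hf : ∀ bv, (f bv).1 = bv.1) (h : d'.items = d.items.map f) :
    d'.keys = d.keys := by
  have : d'.keys = d'.items.map (·.1) := rfl
  rw [this, h, List.map_map]
  have : ((·.1) ∘ f : String × Option Int → String) = (·.1) := funext hf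
  rw [this]
  rfl

theorem fbr_body_items (position : Int) (pl : String) (hitAll : Bool) (b0 lb0 : String)
    (d : PySem.Dict String (Option Int)) (hnd : d.keys.Nodup) :
    ((match d.get? b0 with
      | some none =>
          if PySem.Str.isIn lb0 pl || hitAll then d.insert b0 (some position) else d
      | _ => d) : PySem.Dict String (Option Int)).items
      = d.items.map (fun bv =>
          if bv.1 = b0 ∧ bv.2 = none ∧ (PySem.Str.isIn lb0 pl || hitAll) = true
          then (b0, some position) else bv) := by
  cases hd : d.get? b0 with
  | none =>
      have h0 : b0 ∉ d.keys := (PySem.Dict.get?_eq_none_iff_not_mem_keys d b0).mp hd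
      have hpt : ∀ bv ∈ d.items,
          (if bv.1 = b0 ∧ bv.2 = none ∧ (PySem.Str.isIn lb0 pl || hitAll) = true
           then ((b0, some position) : String × Option Int) else bv) = bv := by
        intro bv hbv
        refine if_neg ?_
        rintro ⟨h1, -, -⟩
        exact h0 (h1 ▸ PySem.Dict.mem_keys_of_mem_items d hbv)
      rw [List.map_congr_left hpt, List.map_id']
  | some v =>
      cases v with
      | some q =>
          have hpt : ∀ bv ∈ d.items,
              (if bv.1 = b0 ∧ bv.2 = none ∧ (PySem.Str.isIn lb0 pl || hitAll) = true
               then ((b0, some position) : String × Option Int) else bv) = bv := by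
            rintro ⟨b, v⟩ hbv
            refine if_neg ?_
            rintro ⟨h1, h2, -⟩
            simp only at h1 h2
            subst h1 h2
            have := PySem.Dict.get?_of_mem_items d hbv hnd
            rw [hd] at this
            simp at this
          rw [List.map_congr_left hpt, List.map_id']
      | none =>
          by_cases hc : (PySem.Str.isIn lb0 pl || hitAll) = true
          · have hcon : d.contains b0 = true := by
              rw [PySem.Dict.contains_eq_isSome_get?, hd]; rfl
            rw [if_pos hc, PySem.Dict.items_insert_of_contains _ _ hcon]
            apply List.map_congr_left
            rintro ⟨b, v⟩ hbv
            by_cases h : b = b0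
            · subst h
              have := PySem.Dict.get?_of_mem_items d hbv hnd
              rw [hd] at this
              have hv : v = none := Option.some.inj this.symm
              subst hv
              rw [if_pos (by simp), if_pos ⟨rfl, rfl, hc⟩]
            · rw [if_neg (by simpa using h), if_neg (by rintro ⟨h1, -, -⟩; exact h h1)]
          · rw [if_neg hc]
            have hpt : ∀ bv ∈ d.items,
                (if bv.1 = b0 ∧ bv.2 = none ∧ (PySem.Str.isIn lb0 pl || hitAll) = true
                 then ((b0, some position) : String × Option Int) else bv) = bv := by
              intro bv hbv
              refine if_neg ?_
              rintro ⟨-, -, h3⟩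
              exact hc h3
            rw [List.map_congr_left hpt, List.map_id']

-- keys are unchanged by an fst-preserving items map

theorem fbr_f0_fst (position : Int) (pl : String) (hitAll : Bool) (b0 : String)
    (bv : String × Option Int) :
    ((fun bv : String × Option Int =>
        if bv.1 = b0 ∧ bv.2 = none ∧ (PySem.Str.isIn (PySem.Str.lower b0) pl || hitAll) = true
        then (b0, some position) else bv) bv).1 = bv.1 := by
  dsimp only
  split_ifs with h
  · exact h.1.symm
  · rfl

theorem fbr_ptwise (position : Int) (pl : String) (hitAll : Bool) (b0 : String)
    (rest : List String) (b : String) (v : Option Int) :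
    (fun bv : String × Option Int =>
        if bv.1 ∈ rest ∧ bv.2 = none ∧ (PySem.Str.isIn (PySem.Str.lower bv.1) pl || hitAll) = true
        then (bv.1, some position) else bv)
      ((fun bv : String × Option Int =>
          if bv.1 = b0 ∧ bv.2 = none ∧ (PySem.Str.isIn (PySem.Str.lower b0) pl || hitAll) = true
          then (b0, some position) else bv) (b, v))
    = (if b ∈ b0 :: rest ∧ v = none ∧ (PySem.Str.isIn (PySem.Str.lower b) pl || hitAll) = true
       then (b, some position) else (b, v)) := by
  dsimp only
  by_cases h1 : b = b0
  · subst h1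
    by_cases h2 : v = none
    · subst h2
      by_cases h3 : (PySem.Str.isIn (PySem.Str.lower b) pl || hitAll) = true
      · simp at h3; simp [h3]
      · simp at h3; simp [h3]
    · simp [h2]
  · by_cases h2 : v = none
    · subst h2
      by_cases h3 : (PySem.Str.isIn (PySem.Str.lower b) pl || hitAll) = true
      · simp at h3; simp [h1, h3, List.mem_cons]
      · simp at h3; simp [h1, h3]
    · simp [h1, h2]

theorem fbr_inner_items (position : Int) (pl : String) (hitAll : Bool) (K : List String)
    (d : PySem.Dict String (Option Int)) (hnd : d.keys.Nodup) :
    (fbrInner position pl hitAll (K.map (fun b => (b, PySem.Str.lower b))) d).items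
      = d.items.map (fun bv =>
          if bv.1 ∈ K ∧ bv.2 = none ∧ (PySem.Str.isIn (PySem.Str.lower bv.1) pl || hitAll) = true
          then (bv.1, some position) else bv) := by
  induction K generalizing d with
  | nil =>
      have hpt : ∀ bv ∈ d.items,
          (if bv.1 ∈ ([] : List String) ∧ bv.2 = none ∧
              (PySem.Str.isIn (PySem.Str.lower bv.1) pl || hitAll) = true
           then (bv.1, some position) else bv) = bv := by
        intro bv _
        exact if_neg (by rintro ⟨h1, -, -⟩; exact (List.not_mem_nil h1))
      rw [List.map_congr_left hpt, List.map_id']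
      rfl
  | cons b0 rest ih =>
      have hbody := fbr_body_items position pl hitAll b0 (PySem.Str.lower b0) d hnd
      have hkeys1 := fbr_keys_of_items_map d _ _ (fbr_f0_fst position pl hitAll b0) hbody
      have hnd1 : (PySem.Dict.items (κ := String) (ν := Option Int)
          (match d.get? b0 with
           | some none =>
               if PySem.Str.isIn (PySem.Str.lower b0) pl || hitAll
               then d.insert b0 (some position) else d
           | _ => d)).map (·.1) |>.Nodup := by
        rw [show (PySem.Dict.items (κ := String) (ν := Option Int)
          (match d.get? b0 with
           | some none =>
               if PySem.Str.isIn (PySem.Str.lower b0) pl || hitAll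
               then d.insert b0 (some position) else d
           | _ => d)).map (·.1) = _ from hkeys1]
        exact hnd
      rw [show fbrInner position pl hitAll ((b0 :: rest).map (fun b => (b, PySem.Str.lower b))) d
          = fbrInner position pl hitAll (rest.map (fun b => (b, PySem.Str.lower b)))
              (match d.get? b0 with
               | some none =>
                   if PySem.Str.isIn (PySem.Str.lower b0) pl || hitAll
                   then d.insert b0 (some position) else d
               | _ => d) from rfl]
      rw [ih _ hnd1, hbody, List.map_map]
      apply List.map_congr_left
      rintro ⟨b, v⟩ hbv
      exact fbr_ptwise position pl hitAll b0 rest b v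

theorem fbr_f1_fst (position : Int) (pl : String) (hitAll : Bool) (K : List String)
    (bv : String × Option Int) :
    ((fun bv : String × Option Int =>
        if bv.1 ∈ K ∧ bv.2 = none ∧ (PySem.Str.isIn (PySem.Str.lower bv.1) pl || hitAll) = true
        then (bv.1, some position) else bv) bv).1 = bv.1 := by
  dsimp only
  split_ifs <;> rfl

theorem fbr_loop_ptwise (position : Int) (product : String) (rest : List (Int × String))
    (K : List String) (b : String) (v : Option Int) (hbK : b ∈ K) :
    (fun bv : String × Option Int => ((bv.1, fbrResolve bv.1 bv.2 rest) : String × Option Int))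
      ((fun bv : String × Option Int =>
          if bv.1 ∈ K ∧ bv.2 = none ∧
              (PySem.Str.isIn (PySem.Str.lower bv.1) (PySem.Str.lower product) ||
                (PySem.Str.isIn "l'oreal" (PySem.Str.lower product) &&
                 PySem.Str.isIn "paris" (PySem.Str.lower product))) = true
          then (bv.1, some position) else bv) (b, v))
    = (b, fbrResolve b v ((position, product) :: rest)) := by
  dsimp only
  cases v with
  | some q => rw [if_neg (by rintro ⟨-, h2, -⟩; simp at h2)]; rfl
  | none =>
      by_cases hc : (PySem.Str.isIn (PySem.Str.lower b) (PySem.Str.lower product) ||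
            (PySem.Str.isIn "l'oreal" (PySem.Str.lower product) &&
             PySem.Str.isIn "paris" (PySem.Str.lower product))) = true
      · rw [if_pos ⟨hbK, rfl, hc⟩]
        show (b, some position) = (b, fbrScanA b ((position, product) :: rest))
        rw [show fbrScanA b ((position, product) :: rest)
            = if brandHit (PySem.Str.lower b) (PySem.Str.lower product) then some position
              else fbrScanA b rest from rfl]
        rw [if_pos (show brandHit (PySem.Str.lower b) (PySem.Str.lower product) = true from hc)]
      · rw [if_neg (by rintro ⟨-, -, h3⟩; exact hc h3)]
        show (b, fbrScanA b rest) = (b, fbrScanA b ((position, product) :: rest))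
        rw [show fbrScanA b ((position, product) :: rest)
            = if brandHit (PySem.Str.lower b) (PySem.Str.lower product) then some position
              else fbrScanA b rest from rfl]
        rw [if_neg (show ¬ brandHit (PySem.Str.lower b) (PySem.Str.lower product) = true from hc)]

theorem fbr_loop_items (K : List String) (E : List (Int × String))
    (d : PySem.Dict String (Option Int)) (hnd : d.keys.Nodup)
    (hsub : ∀ bv ∈ d.items, bv.1 ∈ K) :
    (fbrLoop (K.map (fun b => (b, PySem.Str.lower b))) E d).items
      = d.items.map (fun bv => (bv.1, fbrResolve bv.1 bv.2 E)) := by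
  induction E generalizing d with
  | nil =>
      have hpt : ∀ bv ∈ d.items,
          ((fun bv : String × Option Int => ((bv.1, fbrResolve bv.1 bv.2 []) : String × Option Int)) bv) = bv := by
        rintro ⟨b, v⟩ _
        cases v <;> rfl
      rw [List.map_congr_left hpt, List.map_id']
      rfl
  | cons pp rest ih =>
      obtain ⟨position, product⟩ := pp
      by_cases hall : (d.values.all (fun v => v.isSome)) = true
      · have hstop : fbrLoop (K.map (fun b => (b, PySem.Str.lower b))) ((position, product) :: rest) d = d := by
          simp [fbrLoop, hall]
        rw [hstop]
        have hpt : ∀ bv ∈ d.items,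
            ((fun bv : String × Option Int =>
              ((bv.1, fbrResolve bv.1 bv.2 ((position, product) :: rest)) : String × Option Int)) bv) = bv := by
          rintro ⟨b, v⟩ hbv
          cases v with
          | some q => rfl
          | none =>
              exfalso
              have hmem : (none : Option Int) ∈ d.values :=
                List.mem_map.mpr ⟨(b, none), hbv, rfl⟩
              have := List.all_eq_true.mp hall _ hmem
              simp at this
        rw [List.map_congr_left hpt, List.map_id']
      · have hstep : fbrLoop (K.map (fun b => (b, PySem.Str.lower b))) ((position, product) :: rest) d
            = fbrLoop (K.map (fun b => (b, PySem.Str.lower b))) rest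
                (fbrInner position (PySem.Str.lower product)
                  (PySem.Str.isIn "l'oreal" (PySem.Str.lower product) &&
                   PySem.Str.isIn "paris" (PySem.Str.lower product))
                  (K.map (fun b => (b, PySem.Str.lower b))) d) := by
          simp [fbrLoop, hall]
        rw [hstep]
        have hin := fbr_inner_items position (PySem.Str.lower product)
          (PySem.Str.isIn "l'oreal" (PySem.Str.lower product) &&
           PySem.Str.isIn "paris" (PySem.Str.lower product)) K d hnd
        have hkeys1 := fbr_keys_of_items_map d _ _
          (fbr_f1_fst position (PySem.Str.lower product) _ K) hin
        have hnd1 : (fbrInner position (PySem.Str.lower product)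
            (PySem.Str.isIn "l'oreal" (PySem.Str.lower product) &&
             PySem.Str.isIn "paris" (PySem.Str.lower product))
            (K.map (fun b => (b, PySem.Str.lower b))) d).keys.Nodup := by
          rw [hkeys1]; exact hnd
        have hsub1 : ∀ bv ∈ (fbrInner position (PySem.Str.lower product)
            (PySem.Str.isIn "l'oreal" (PySem.Str.lower product) &&
             PySem.Str.isIn "paris" (PySem.Str.lower product))
            (K.map (fun b => (b, PySem.Str.lower b))) d).items, bv.1 ∈ K := by
          intro bv hbv
          rw [hin] at hbv
          obtain ⟨bw, hbw, hE⟩ := List.mem_map.mp hbv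
          rw [← hE]
          split_ifs <;> simpa using hsub bw hbw
        rw [ih _ hnd1 hsub1, hin, List.map_map]
        apply List.map_congr_left
        rintro ⟨b, v⟩ hbv
        exact fbr_loop_ptwise position product rest K b v (hsub (b, v) hbv)

theorem fbr_getD_foldl_insert (f : String → Option Int) (tb : List String)
    (d : PySem.Dict String (Option Int)) (k : String) (dflt : Option Int) :
    (tb.foldl (fun d b => d.insert b (f b)) d).getD k dflt
      = if k ∈ tb then f k else d.getD k dflt := by
  induction tb generalizing d with
  | nil => simp
  | cons b0 rest ih =>
      simp only [List.foldl_cons, ih, PySem.Dict.getD_insert, List.mem_cons]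
      by_cases h1 : k ∈ rest <;> by_cases h2 : k = b0 <;> simp [h1, h2]

theorem fbr_main (products target_brands : List String) :
    find_brand_rankings products target_brands = find_brand_rankings_alt products target_brands := by
  have hAfun : (fun (rankings : PySem.Dict String (Option Int)) brand =>
      match fbrScanA brand (PySem.List.enumerate (PySem.List.slice products none (some 100)) 1) with
      | some position => rankings.insert brand (some position)
      | none => rankings.insert brand none)
      = fun d b => d.insert b (fbrScanA b (PySem.List.enumerate (PySem.List.slice products none (some 100)) 1)) := by
    funext d b
    cases fbrScanA b (PySem.List.enumerate (PySem.List.slice products none (some 100)) 1) <;> rfl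
  have hA : find_brand_rankings products target_brands
      = (target_brands.foldl
          (fun d b => d.insert b (fbrScanA b (PySem.List.enumerate (PySem.List.slice products none (some 100)) 1)))
          PySem.Dict.empty).items := by
    unfold find_brand_rankings
    rw [hAfun]
  -- shared key structure
  have hndA : (target_brands.foldl
      (fun d b => d.insert b (fbrScanA b (PySem.List.enumerate (PySem.List.slice products none (some 100)) 1)))
      (PySem.Dict.empty : PySem.Dict String (Option Int))).keys.Nodup :=
    PySem.Dict.nodup_keys_foldl_insert _ _ _ (by simp)
  have hndI : (target_brands.foldl (fun d b => d.insert b none)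
      (PySem.Dict.empty : PySem.Dict String (Option Int))).keys.Nodup :=
    PySem.Dict.nodup_keys_foldl_insert _ _ _ (by simp)
  have hkeysA : (target_brands.foldl
      (fun d b => d.insert b (fbrScanA b (PySem.List.enumerate (PySem.List.slice products none (some 100)) 1)))
      (PySem.Dict.empty : PySem.Dict String (Option Int))).keys
      = (target_brands.foldl (fun d b => d.insert b none)
          (PySem.Dict.empty : PySem.Dict String (Option Int))).keys := by
    rw [PySem.Dict.keys_foldl_insert, PySem.Dict.keys_foldl_insert]
  have hmemtb : ∀ k ∈ (target_brands.foldl (fun d b => d.insert b none)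
      (PySem.Dict.empty : PySem.Dict String (Option Int))).keys, k ∈ target_brands := by
    intro k hk
    rw [PySem.Dict.keys_foldl_insert] at hk
    exact (PySem.List.mem_dedup target_brands k).mp hk
  -- A items
  have hitemsA : (target_brands.foldl
      (fun d b => d.insert b (fbrScanA b (PySem.List.enumerate (PySem.List.slice products none (some 100)) 1)))
      (PySem.Dict.empty : PySem.Dict String (Option Int))).items
      = (target_brands.foldl (fun d b => d.insert b none)
          (PySem.Dict.empty : PySem.Dict String (Option Int))).keys.map
          (fun k => (k, fbrScanA k (PySem.List.enumerate (PySem.List.slice products none (some 100)) 1))) := by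
    rw [PySem.Dict.items_eq_map_keys _ hndA none, hkeysA]
    apply List.map_congr_left
    intro k hk
    rw [fbr_getD_foldl_insert, if_pos (hmemtb k hk)]
  -- init items
  have hitemsI : (target_brands.foldl (fun d b => d.insert b none)
      (PySem.Dict.empty : PySem.Dict String (Option Int))).items
      = (target_brands.foldl (fun d b => d.insert b none)
          (PySem.Dict.empty : PySem.Dict String (Option Int))).keys.map
          (fun k => (k, (none : Option Int))) := by
    rw [PySem.Dict.items_eq_map_keys _ hndI none]
    apply List.map_congr_left
    intro k hk
    rw [fbr_getD_foldl_insert (fun _ => none), if_pos (hmemtb k hk)]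
  -- B side
  have hB : find_brand_rankings_alt products target_brands
      = (target_brands.foldl (fun d b => d.insert b none)
          (PySem.Dict.empty : PySem.Dict String (Option Int))).items.map
          (fun bv => (bv.1, fbrResolve bv.1 bv.2 (PySem.List.enumerate (PySem.List.slice products none (some 100)) 1))) := by
    unfold find_brand_rankings_alt
    exact fbr_loop_items _ _ _ hndI
      (fun bv hbv => PySem.Dict.mem_keys_of_mem_items _ hbv)
  rw [hA, hB, hitemsA, hitemsI, List.map_map]
  apply List.map_congr_left
  intro k _
  rfl

-- ===== VERDICT (by name: the statement is the Claim_ definition above) =====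
theorem find_brand_rankings_spec : Claim_equal_find_brand_rankings := by
  intro products target_brands _
  unfold Spec_find_brand_rankings
  exact fbr_main products target_brands
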